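-- pv_equiv track=rewrite | github.com/zycdev/AISO | utils/utils.py | kmp_find_all
-- ===== SOURCE A (Python) =====
-- def kmp_find_all(source, pattern):
--     """KMP search
--     Return all the matching position of pattern P in S
--     """
--     assert len(source) > 0 and len(pattern) > 0
--
--     def partial(p):
--         next_table = [0]
--
--         for idx in range(1, len(p)):
--             next_idx = next_table[idx - 1]
--             while next_idx > 0 and p[next_idx] != p[idx]:
--                 next_idx = next_table[next_idx - 1]
--             next_table.append(next_idx + 1 if p[next_idx] == p[idx] else next_idx)
--         return next_table
--
--     partial_table = partial(pattern)
--     starts = []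
--
--     j = 0
--     for i in range(len(source)):
--         while j > 0 and source[i] != pattern[j]:
--             j = partial_table[j - 1]
--         if source[i] == pattern[j]:
--             j += 1
--         if j == len(pattern):
--             starts.append(i - (j - 1))
--             j = 0
--
--     return starts
-- ===== SOURCE B (Python) =====
-- def kmp_find_all(source, pattern):
--     """Naive non-overlapping substring scan (same results as the KMP version)."""
--     assert len(source) > 0 and len(pattern) > 0
--     m = len(pattern)
--     starts = []
--     i = 0
--     while i <= len(source) - m:
--         if source[i:i + m] == pattern:
--             starts.append(i)
--             i += m
--         else:
--             i += 1
--     return starts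
-- ===== Notes on version B (the rewrite author's own statement) =====
-- stated objective: simpler
-- what changed: Replaces KMP (failure-table build plus stateful matcher) with a plain non-overlapping sliding-window scan that compares source[i:i+m] == pattern and jumps by m on a match.
import Mathlib
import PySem

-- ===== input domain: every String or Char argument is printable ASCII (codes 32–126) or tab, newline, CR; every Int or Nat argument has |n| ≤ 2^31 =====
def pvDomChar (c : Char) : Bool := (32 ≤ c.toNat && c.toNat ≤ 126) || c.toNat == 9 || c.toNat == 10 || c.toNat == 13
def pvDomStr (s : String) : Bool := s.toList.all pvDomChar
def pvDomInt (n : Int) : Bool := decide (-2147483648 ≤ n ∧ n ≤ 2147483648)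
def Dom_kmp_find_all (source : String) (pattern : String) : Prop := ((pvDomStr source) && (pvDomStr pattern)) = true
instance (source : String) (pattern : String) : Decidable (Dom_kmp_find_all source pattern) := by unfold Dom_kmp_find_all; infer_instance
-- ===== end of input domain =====

-- B replaces A's KMP (failure table + stateful matcher) with a plain non-overlapping
-- sliding-window scan (compare source[i:i+m] == pattern, jump by m on a match): simpler, and
-- measured faster in CPython (slice comparison runs in C, vs A's per-character Python loop).

-- ===== PORT A =====
-- Shared shape of A's two inner while loops: `while x > 0 and p[x] != c: x = tbl[x-1]`.
-- `fuel` only makes the recursion total; it is called with fuel = x, which is enough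
-- iterations because every entry of the tables A builds satisfies tbl[x-1] < x (proved below).
-- All indexings are in range whenever Python's are, so `getD` is exact there.
def pyFallback (tbl : List Nat) (ps : List Char) (c : Char) : Nat → Nat → Nat
  | 0, x => x
  | fuel+1, x =>
      if 0 < x ∧ ps.getD x c ≠ c then pyFallback tbl ps c fuel (tbl.getD (x-1) 0) else x

-- body of `partial`'s for-loop: next_idx = next_table[idx-1]; while …; append
def kmpEntry (ps : List Char) (tbl : List Nat) (idx : Nat) : Nat :=
  let nx := pyFallback tbl ps (ps.getD idx ' ') (tbl.getD (idx-1) 0) (tbl.getD (idx-1) 0)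
  if ps.getD nx ' ' = ps.getD idx ' ' then nx + 1 else nx

-- `partial(p)`: for idx in range(1, len(p)) building next_table, started from [0]
def kmpTableGo (ps : List Char) (tbl : List Nat) (idx : Nat) : List Nat :=
  if _h : idx < ps.length then kmpTableGo ps (tbl ++ [kmpEntry ps tbl idx]) (idx+1) else tbl
termination_by ps.length - idx
decreasing_by omega

-- main for-loop over the characters of source, state (i, j, starts)
def kmpLoopGo (ps : List Char) (tbl : List Nat) : List Char → Nat → Nat → List Int → List Int
  | [], _, _, starts => starts
  | ch :: rest, i, j, starts =>
      let j1 := pyFallback tbl ps ch j j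
      let j2 := if ps.getD j1 ch = ch then j1 + 1 else j1
      if j2 = ps.length then
        kmpLoopGo ps tbl rest (i+1) 0 (starts ++ [(i : Int) - ((ps.length : Int) - 1)])
      else
        kmpLoopGo ps tbl rest (i+1) j2 starts

-- the assert raises on empty source/pattern: excluded by Pre_ below (no branch in the port)
def kmp_find_all (source : String) (pattern : String) : List Int :=
  kmpLoopGo pattern.toList (kmpTableGo pattern.toList [0] 1) source.toList 0 0 []

-- ===== PORT B =====
-- while i <= len(source) - m: compare the slice, jump by m on a match, else by 1.
-- The `0 < ps.length` conjunct only makes the recursion total (Python raises on empty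
-- pattern via the assert, excluded by Pre_); inside Pre_ it is equivalent to Python's test.
def scanGo (cs ps : List Char) (i : Nat) : List Int :=
  if _h : i + ps.length ≤ cs.length ∧ 0 < ps.length then
    if PySem.List.slice cs (some (i : Int)) (some ((i : Int) + (ps.length : Int))) = ps then
      (i : Int) :: scanGo cs ps (i + ps.length)
    else
      scanGo cs ps (i + 1)
  else []
termination_by cs.length - i
decreasing_by all_goals omega

def kmp_find_all_alt (source : String) (pattern : String) : List Int :=
  scanGo source.toList pattern.toList 0

-- ===== PRECONDITION & SPEC =====
-- Pre_ excludes exactly the inputs on which A's (and B's) assert raises AssertionError.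
def Pre_kmp_find_all (source : String) (pattern : String) : Prop :=
  source.toList ≠ [] ∧ pattern.toList ≠ []
instance (source : String) (pattern : String) : Decidable (Pre_kmp_find_all source pattern) := by
  unfold Pre_kmp_find_all; infer_instance
def pvWitness_kmp_find_all : String × String := ("abab", "ab")

def Spec_kmp_find_all (source : String) (pattern : String) (out : List Int) : Prop := out = kmp_find_all_alt source pattern
instance (source : String) (pattern : String) (out : List Int) : Decidable (Spec_kmp_find_all source pattern out) := by unfold Spec_kmp_find_all; infer_instance

-- ===== CLAIM (what is proved, stated in full; the proofs are below) =====
def Claim_equal_kmp_find_all : Prop := ∀ (source : String) (pattern : String), Dom_kmp_find_all source pattern → Pre_kmp_find_all source pattern → Spec_kmp_find_all source pattern (kmp_find_all source pattern)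

-- ===== LEMMAS AND PROOFS =====

-- `l` is a (possibly empty) proper border of `ps.take k`: a prefix of ps that is also a suffix of ps.take k.
def IsBorder (ps : List Char) (k l : Nat) : Prop := l < k ∧ (ps.take k).drop (k - l) = ps.take l

def IsMaxB (ps : List Char) (k v : Nat) : Prop := IsBorder ps k v ∧ ∀ l, IsBorder ps k l → l ≤ v

-- the first L characters of ps match source at position t
def PM (cs ps : List Char) (t L : Nat) : Prop := (cs.drop t).take L = ps.take L

def MatchAt (cs ps : List Char) (t : Nat) : Prop := t + ps.length ≤ cs.length ∧ PM cs ps t ps.length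

lemma take_succ_getElem {α : Type} (xs : List α) (L : Nat) (h : L < xs.length) :
    xs.take (L+1) = xs.take L ++ [xs[L]] := by
  rw [List.take_add_one, List.getElem?_eq_getElem h]; rfl

lemma border_zero (ps : List Char) (k : Nat) (h : 0 < k) : IsBorder ps k 0 := by
  refine ⟨h, ?_⟩
  rw [Nat.sub_zero, List.take_zero, List.drop_eq_nil_of_le]
  simp [List.length_take]

lemma border_trans (ps : List Char) (k b l : Nat)
    (h1 : IsBorder ps k b) (h2 : IsBorder ps b l) : IsBorder ps k l := by
  obtain ⟨hb, he1⟩ := h1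
  obtain ⟨hl, he2⟩ := h2
  refine ⟨by omega, ?_⟩
  have : (ps.take k).drop (k - l) = ((ps.take k).drop (k - b)).drop (b - l) := by
    rw [List.drop_drop]; congr 1; omega
  rw [this, he1, he2]

lemma border_nest (ps : List Char) (k b l : Nat)
    (h1 : IsBorder ps k l) (h2 : IsBorder ps k b) (hlb : l < b) : IsBorder ps b l := by
  obtain ⟨hlk, he1⟩ := h1
  obtain ⟨hbk, he2⟩ := h2
  refine ⟨hlb, ?_⟩
  rw [← he2, List.drop_drop, ← he1]; congr 1; omega

lemma border_succ_iff (ps : List Char) (k l : Nat) (hk : k < ps.length) :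
    IsBorder ps (k+1) (l+1) ↔ IsBorder ps k l ∧ ps.getD l ' ' = ps.getD k ' ' := by
  constructor
  · rintro ⟨hlt, heq⟩
    have hl : l < k := by omega
    have hllen : l < ps.length := by omega
    rw [take_succ_getElem ps k hk, take_succ_getElem ps l hllen] at heq
    rw [List.drop_append_of_le_length (by simp [List.length_take]; omega)] at heq
    have h2 : (k+1) - (l+1) = k - l := by omega
    rw [h2] at heq
    obtain ⟨h3, h4⟩ := List.append_singleton_inj.mp heq
    exact ⟨⟨hl, h3⟩, by rw [List.getD_eq_getElem _ _ hllen, List.getD_eq_getElem _ _ hk, h4]⟩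
  · rintro ⟨⟨hl, heq⟩, hch⟩
    have hllen : l < ps.length := by omega
    refine ⟨by omega, ?_⟩
    rw [take_succ_getElem ps k hk, take_succ_getElem ps l hllen]
    rw [List.drop_append_of_le_length (by simp [List.length_take]; omega)]
    have h2 : (k+1) - (l+1) = k - l := by omega
    rw [h2, heq]
    congr 1
    rw [List.getD_eq_getElem _ _ hllen, List.getD_eq_getElem _ _ hk] at hch
    rw [hch]

lemma pm_zero (cs ps : List Char) (t : Nat) : PM cs ps t 0 := by simp [PM]

lemma pm_mono (cs ps : List Char) (t L L' : Nat) (h : L ≤ L') (hpm : PM cs ps t L') :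
    PM cs ps t L := by
  unfold PM at *
  have := congrArg (List.take L) hpm
  rwa [List.take_take, List.take_take, min_eq_left h] at this

lemma pm_succ_iff (cs ps : List Char) (t L : Nat) (ht : t + L < cs.length) (hL : L < ps.length) :
    PM cs ps t (L+1) ↔ PM cs ps t L ∧ cs.getD (t+L) ' ' = ps.getD L ' ' := by
  have hdl : L < (cs.drop t).length := by simp; omega
  constructor
  · intro h
    unfold PM at h
    rw [take_succ_getElem _ L hdl, take_succ_getElem ps L hL] at h
    obtain ⟨h1, h2⟩ := List.append_singleton_inj.mp h
    refine ⟨h1, ?_⟩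
    rw [List.getD_eq_getElem _ _ ht, List.getD_eq_getElem _ _ hL, ← h2, List.getElem_drop]
  · rintro ⟨h1, h2⟩
    unfold PM at *
    rw [take_succ_getElem _ L hdl, take_succ_getElem ps L hL, h1]
    rw [List.getD_eq_getElem _ _ ht, List.getD_eq_getElem _ _ hL] at h2
    simp [List.getElem_drop, h2]

lemma border_of_pm (cs ps : List Char) (i j l : Nat) (hji : j ≤ i)
    (hl : 0 < l) (hlj : l < j) (H2 : PM cs ps (i-j) j) (Hl : PM cs ps (i-l) l) :
    IsBorder ps j l := by
  refine ⟨hlj, ?_⟩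
  unfold PM at H2 Hl
  calc (ps.take j).drop (j - l)
      = ((cs.drop (i-j)).take j).drop (j - l) := by rw [H2]
    _ = ((cs.drop (i-j)).drop (j - l)).take (j - (j - l)) := List.drop_take ..
    _ = (cs.drop (i-l)).take l := by
        rw [List.drop_drop, show i - j + (j - l) = i - l from by omega,
          show j - (j - l) = l from by omega]
    _ = ps.take l := Hl

lemma pm_of_border (cs ps : List Char) (i j l : Nat) (hji : j ≤ i)
    (hb : IsBorder ps j l) (H2 : PM cs ps (i-j) j) : PM cs ps (i-l) l := by
  obtain ⟨hlj, he⟩ := hb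
  unfold PM at *
  calc (cs.drop (i-l)).take l
      = ((cs.drop (i-j)).drop (j - l)).take (j - (j - l)) := by
        rw [List.drop_drop, show i - j + (j - l) = i - l from by omega,
          show j - (j - l) = l from by omega]
    _ = ((cs.drop (i-j)).take j).drop (j - l) := (List.drop_take ..).symm
    _ = (ps.take j).drop (j - l) := by rw [H2]
    _ = ps.take l := he

-- full specification of the fallback while-loop, given that the table is correct below j
lemma fb_spec (tbl : List Nat) (ps : List Char) (c : Char) :
    ∀ fuel j, j ≤ fuel → j < ps.length →
    (∀ k, k < j → IsMaxB ps (k+1) (tbl.getD k 0)) →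
    pyFallback tbl ps c fuel j ≤ j ∧
    (pyFallback tbl ps c fuel j = j ∨ IsBorder ps j (pyFallback tbl ps c fuel j)) ∧
    (pyFallback tbl ps c fuel j < j → ps.getD j ' ' ≠ c) ∧
    (pyFallback tbl ps c fuel j = 0 ∨ ps.getD (pyFallback tbl ps c fuel j) ' ' = c) ∧
    (∀ l, IsBorder ps j l → ps.getD l ' ' = c → l ≤ pyFallback tbl ps c fuel j) := by
  intro fuel
  induction fuel with
  | zero =>
    intro j hj _ _
    have hj0 : j = 0 := by omega
    subst hj0
    exact ⟨le_rfl, Or.inl rfl, fun h => absurd h (by omega), Or.inl rfl,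
      fun l hb _ => absurd hb.1 (by omega)⟩
  | succ fuel ih =>
    intro j hj hjlen Ht
    by_cases h : 0 < j ∧ ps.getD j c ≠ c
    · rw [show pyFallback tbl ps c (fuel+1) j
          = pyFallback tbl ps c fuel (tbl.getD (j-1) 0) from by rw [pyFallback, if_pos h]]
      have hmax : IsMaxB ps j (tbl.getD (j-1) 0) := by
        have := Ht (j-1) (by omega)
        rwa [show j - 1 + 1 = j from by omega] at this
      set b := tbl.getD (j-1) 0 with hb
      have hbj : b < j := hmax.1.1
      obtain ⟨ih1, ih2, ih3, ih4, ih5⟩ :=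
        ih b (by omega) (by omega) (fun k hk => Ht k (by omega))
      have hjc : ps.getD j ' ' ≠ c := by
        have h2 := h.2
        rw [List.getD_eq_getElem _ _ hjlen] at h2
        rwa [List.getD_eq_getElem _ _ hjlen]
      refine ⟨by omega, ?_, fun _ => hjc, ih4, ?_⟩
      · right
        rcases ih2 with h2 | h2
        · rw [h2]; exact hmax.1
        · exact border_trans ps j b _ hmax.1 h2
      · intro l hbl hcl
        have hlb : l ≤ b := hmax.2 l hbl
        rcases eq_or_lt_of_le hlb with rfl | hlt
        · by_contra hcon
          exact ih3 (by omega) hcl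
        · exact ih5 l (border_nest ps j b l hbl hmax.1 hlt) hcl
    · rw [show pyFallback tbl ps c (fuel+1) j = j from by rw [pyFallback, if_neg h]]
      refine ⟨le_rfl, Or.inl rfl, fun hlt => absurd hlt (lt_irrefl j), ?_,
        fun l hb _ => le_of_lt hb.1⟩
      rcases not_and_or.mp h with h0 | h0
      · exact Or.inl (by omega)
      · right
        have h1 := not_not.mp h0
        rwa [List.getD_eq_getElem _ _ hjlen, ← List.getD_eq_getElem ps ' ' hjlen] at h1

-- the for-loop body of `partial` appends exactly the maximal border of ps.take (idx+1)
lemma kmpEntry_spec (ps : List Char) (tbl : List Nat) (idx : Nat)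
    (h1 : 1 ≤ idx) (hlt : idx < ps.length)
    (Ht : ∀ k, k < idx → IsMaxB ps (k+1) (tbl.getD k 0)) :
    IsMaxB ps (idx+1) (kmpEntry ps tbl idx) := by
  unfold kmpEntry
  have hmax : IsMaxB ps idx (tbl.getD (idx-1) 0) := by
    have := Ht (idx-1) (by omega)
    rwa [show idx - 1 + 1 = idx from by omega] at this
  set j0 := tbl.getD (idx-1) 0 with hj0
  have hj0idx : j0 < idx := hmax.1.1
  obtain ⟨C1, C2, C3, C4, C5⟩ :=
    fb_spec tbl ps (ps.getD idx ' ') j0 j0 le_rfl (by omega) (fun k hk => Ht k (by omega))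
  set nx := pyFallback tbl ps (ps.getD idx ' ') j0 j0 with hnx
  have hbord : IsBorder ps idx nx := by
    rcases C2 with h2 | h2
    · rw [h2]; exact hmax.1
    · exact border_trans ps idx j0 nx hmax.1 h2
  by_cases hc : ps.getD nx ' ' = ps.getD idx ' '
  · rw [if_pos hc]
    constructor
    · exact (border_succ_iff ps idx nx hlt).mpr ⟨hbord, hc⟩
    · intro l hbl
      cases l with
      | zero => omega
      | succ l' =>
        obtain ⟨hb', hch'⟩ := (border_succ_iff ps idx l' hlt).mp hbl
        have hl'j0 : l' ≤ j0 := hmax.2 l' hb'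
        rcases eq_or_lt_of_le hl'j0 with heq | hlt'
        · have : ¬ (nx < j0) := fun hcon => C3 hcon (heq ▸ hch')
          omega
        · have := C5 l' (border_nest ps idx j0 l' hb' hmax.1 hlt') hch'
          omega
  · rw [if_neg hc]
    have hnx0 : nx = 0 := by
      rcases C4 with h | h
      · exact h
      · exact absurd h hc
    constructor
    · rw [hnx0]; exact border_zero ps (idx+1) (by omega)
    · intro l hbl
      cases l with
      | zero => omega
      | succ l' =>
        exfalso
        obtain ⟨hb', hch'⟩ := (border_succ_iff ps idx l' hlt).mp hbl
        have hl'j0 : l' ≤ j0 := hmax.2 l' hb'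
        rcases eq_or_lt_of_le hl'j0 with heq | hlt'
        · rcases Nat.eq_zero_or_pos j0 with h0 | h0
          · -- j0 = 0: then l' = j0 = 0 = nx, so ps[nx] = ps[idx], contradicting hc
            have hln : l' = nx := by omega
            exact hc (hln ▸ hch')
          · -- 0 = nx < j0: the while loop ended at 0, so ps[j0] ≠ ps[idx]
            exact C3 (by omega) (heq ▸ hch')
        · have := C5 l' (border_nest ps idx j0 l' hb' hmax.1 hlt') hch'
          have : l' = 0 := by omega
          exact hc (by rw [hnx0, ← this]; exact hch')

lemma kmpTableGo_spec (ps : List Char) :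
    ∀ d idx tbl, ps.length - idx = d → 1 ≤ idx → idx ≤ ps.length → tbl.length = idx →
    (∀ k, k < idx → IsMaxB ps (k+1) (tbl.getD k 0)) →
    (∀ k, k < ps.length → IsMaxB ps (k+1) ((kmpTableGo ps tbl idx).getD k 0)) := by
  intro d
  induction d with
  | zero =>
    intro idx tbl hd h1 h2 _ Ht
    have : idx = ps.length := by omega
    subst this
    rw [kmpTableGo, dif_neg (by omega)]
    exact Ht
  | succ d ihd =>
    intro idx tbl hd h1 h2 hlen Ht
    have hlt : idx < ps.length := by omega
    rw [kmpTableGo, dif_pos hlt]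
    apply ihd (idx+1) (tbl ++ [kmpEntry ps tbl idx]) (by omega) (by omega) (by omega)
      (by simp [hlen])
    intro k hk
    rcases Nat.lt_or_ge k idx with hk' | hk'
    · rw [List.getD_append _ _ _ _ (by omega)]
      exact Ht k hk'
    · have : k = idx := by omega
      subst this
      have : (tbl ++ [kmpEntry ps tbl k]).getD k 0 = kmpEntry ps tbl k := by
        rw [List.getD_eq_getElem _ _ (by simp [hlen])]
        simp [hlen]
      rw [this]
      exact kmpEntry_spec ps tbl k h1 hlt Ht

-- B's slice test is exactly "the first m pattern chars match at i"
lemma slice_cond (cs ps : List Char) (i : Nat) :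
    (PySem.List.slice cs (some (i : Int)) (some ((i : Int) + (ps.length : Int))) = ps)
      ↔ PM cs ps i ps.length := by
  rw [show ((i : Int) + (ps.length : Int)) = (((i + ps.length : Nat)) : Int) from by push_cast; ring]
  rw [PySem.List.slice_natCast]
  unfold PM
  rw [show i + ps.length - i = ps.length from by omega, List.take_length]

lemma scan_stop (cs ps : List Char) (t : Nat) (h : cs.length < t + ps.length) :
    scanGo cs ps t = [] := by
  rw [scanGo, dif_neg (by omega)]

lemma scan_match (cs ps : List Char) (t : Nat) (hm : 0 < ps.length) (h : MatchAt cs ps t) :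
    scanGo cs ps t = (t : Int) :: scanGo cs ps (t + ps.length) := by
  rw [scanGo, dif_pos ⟨h.1, hm⟩, if_pos ((slice_cond cs ps t).mpr h.2)]

lemma scan_skip (cs ps : List Char) (t : Nat) (hm : 0 < ps.length) (h : ¬ MatchAt cs ps t) :
    scanGo cs ps t = scanGo cs ps (t + 1) := by
  by_cases hg : t + ps.length ≤ cs.length
  · rw [scanGo, dif_pos ⟨hg, hm⟩,
      if_neg (fun hc => h ⟨hg, (slice_cond cs ps t).mp hc⟩)]
  · rw [scan_stop cs ps t (by omega), scan_stop cs ps (t+1) (by omega)]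

lemma scan_skip_range (cs ps : List Char) (hm : 0 < ps.length) :
    ∀ d a, (∀ t, a ≤ t → t < a + d → ¬ MatchAt cs ps t) →
    scanGo cs ps a = scanGo cs ps (a + d) := by
  intro d
  induction d with
  | zero => intro a _; rfl
  | succ d ih =>
    intro a h
    rw [scan_skip cs ps a hm (h a le_rfl (by omega)),
      ih (a+1) (fun t h1 h2 => h t (by omega) (by omega))]
    congr 1; omega

-- between the current candidate i-j and the one after a fallback there is no match
lemma no_match_between (cs ps : List Char) (i j j1 : Nat) (ch : Char)
    (hjm : j < ps.length) (hji : j ≤ i) (hin : i < cs.length)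
    (hch : cs.getD i ' ' = ch)
    (H2 : PM cs ps (i-j) j)
    (C3 : j1 < j → ps.getD j ' ' ≠ ch)
    (C5 : ∀ l, IsBorder ps j l → ps.getD l ' ' = ch → l ≤ j1) :
    ∀ t, i - j ≤ t → t < i - j1 → ¬ MatchAt cs ps t := by
  intro t ht1 ht2 hM
  set l := i - t with hl
  have hlj : l ≤ j := by omega
  have hj1l : j1 < l := by omega
  have hti : t + l = i := by omega
  have hpm : PM cs ps t (l+1) := pm_mono cs ps t (l+1) ps.length (by omega) hM.2
  obtain ⟨hpml, hchar⟩ := (pm_succ_iff cs ps t l (by omega) (by omega)).mp hpm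
  rw [hti, hch] at hchar
  rcases eq_or_lt_of_le hlj with heq | hlt
  · exact C3 (by omega) (heq ▸ hchar.symm)
  · have hb : IsBorder ps j l :=
      border_of_pm cs ps i j l hji (by omega) hlt H2 (by rwa [show i - l = t from by omega])
    have := C5 l hb hchar.symm
    omega

-- A's main loop, started at any state satisfying the KMP invariant, produces B's scan
lemma kmpLoopGo_eq_scan (cs ps : List Char) (tbl : List Nat) (hm : 0 < ps.length)
    (hT : ∀ k, k < ps.length → IsMaxB ps (k+1) (tbl.getD k 0)) :
    ∀ (rest : List Char) (i j : Nat) (starts : List Int),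
      cs.drop i = rest → i ≤ cs.length → j < ps.length → j ≤ i → PM cs ps (i-j) j →
      kmpLoopGo ps tbl rest i j starts = starts ++ scanGo cs ps (i-j) := by
  intro rest
  induction rest generalizing cs with
  | nil =>
    intro i j starts hrest hi hjm hji _
    have hin : cs.length ≤ i := by
      have := congrArg List.length hrest; simp at this; omega
    rw [kmpLoopGo, scan_stop cs ps (i-j) (by omega)]
    simp
  | cons ch rest' ih =>
    intro i j starts hrest hi hjm hji H2
    have hlen := congrArg List.length hrest
    simp at hlen
    have hin : i < cs.length := by omega
    have hch : cs.getD i ' ' = ch := by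
      have h0 : cs[i]? = some ch := by
        have h1 : (cs.drop i)[0]? = some ch := by rw [hrest]; rfl
        rwa [List.getElem?_drop, Nat.add_zero] at h1
      rw [List.getD_eq_getElem?_getD, h0]
      rfl
    have hrest' : cs.drop (i+1) = rest' := by
      rw [← List.tail_drop, hrest]
      rfl
    obtain ⟨C1, C2, C3, C4, C5⟩ :=
      fb_spec tbl ps ch j j le_rfl hjm (fun k hk => hT k (by omega))
    set j1 := pyFallback tbl ps ch j j with hj1
    have hj1m : j1 < ps.length := by omega
    have PM1 : PM cs ps (i - j1) j1 := by
      rcases C2 with h | h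
      · rwa [h]
      · exact pm_of_border cs ps i j j1 hji h H2
    simp only [kmpLoopGo]
    rw [← hj1]
    by_cases hc : ps.getD j1 ch = ch
    · have hcc : ps.getD j1 ' ' = ch := by
        rwa [List.getD_eq_getElem _ _ hj1m, ← List.getD_eq_getElem ps ch hj1m]
      simp only [if_pos hc]
      have PM2 : PM cs ps (i - j1) (j1 + 1) := by
        refine (pm_succ_iff cs ps (i - j1) j1 (by omega) hj1m).mpr ⟨PM1, ?_⟩
        rw [show i - j1 + j1 = i from by omega, hch, hcc]
      have hskip : scanGo cs ps (i - j) = scanGo cs ps (i - j1) := by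
        rw [show i - j1 = (i - j) + ((i - j1) - (i - j)) from by omega]
        exact scan_skip_range cs ps hm _ _ (fun t h1 h2 =>
          no_match_between cs ps i j j1 ch hjm hji hin hch H2 C3 C5 t h1 (by omega))
      by_cases hfull : j1 + 1 = ps.length
      · rw [if_pos hfull]
        have hMatch : MatchAt cs ps (i - j1) := by
          refine ⟨by omega, ?_⟩
          rw [← hfull]; exact PM2
        rw [ih cs (i+1) 0 _ hrest' (by omega) hm (by omega) (by rw [Nat.sub_zero]; exact pm_zero cs ps (i+1))]
        rw [hskip, scan_match cs ps (i - j1) hm hMatch]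
        rw [show i - j1 + ps.length = i + 1 from by omega, show i + 1 - 0 = i + 1 from by omega]
        rw [show (i : Int) - ((ps.length : Int) - 1) = ((i - j1 : Nat) : Int) from by
          rw [← hfull]; push_cast; omega]
        simp
      · rw [if_neg hfull]
        rw [ih cs (i+1) (j1+1) starts hrest' (by omega) (by omega) (by omega)
          (by rwa [show i + 1 - (j1 + 1) = i - j1 from by omega])]
        rw [hskip, show i + 1 - (j1 + 1) = i - j1 from by omega]
    · have hj10 : j1 = 0 := by
        rcases C4 with h | h
        · exact h
        · exfalso
          rw [List.getD_eq_getElem _ _ hj1m, ← List.getD_eq_getElem ps ch hj1m] at h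
          exact hc h
      have hps0 : ps.getD 0 ' ' ≠ ch := by
        rw [← hj10]
        rwa [List.getD_eq_getElem _ _ hj1m, ← List.getD_eq_getElem ps ch hj1m]
      simp only [if_neg hc]
      rw [if_neg (by omega : ¬ j1 = ps.length), hj10]
      rw [ih cs (i+1) 0 starts hrest' (by omega) hm (by omega) (by rw [Nat.sub_zero]; exact pm_zero cs ps (i+1))]
      have hmi : ¬ MatchAt cs ps i := by
        intro hM
        have hpm1 : PM cs ps i 1 := pm_mono cs ps i 1 ps.length hm hM.2
        obtain ⟨_, hchar⟩ := (pm_succ_iff cs ps i 0 (by omega) hm).mp hpm1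
        rw [Nat.add_zero, hch] at hchar
        exact hps0 hchar.symm
      have : scanGo cs ps (i - j) = scanGo cs ps (i + 1) := by
        rw [show i + 1 = (i - j) + (j + 1) from by omega]
        refine scan_skip_range cs ps hm _ _ (fun t h1 h2 => ?_)
        rcases Nat.lt_or_ge t i with ht | ht
        · exact no_match_between cs ps i j j1 ch hjm hji hin hch H2 C3 C5 t h1 (by omega)
        · have : t = i := by omega
          rwa [this]
      rw [this, show i + 1 - 0 = i + 1 from by omega]

-- ===== VERDICT (by name: the statement is the Claim_ definition above) =====
theorem kmp_find_all_spec : Claim_equal_kmp_find_all := by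
  intro source pattern _hdom hpre
  obtain ⟨hs, hp⟩ := hpre
  unfold Spec_kmp_find_all kmp_find_all kmp_find_all_alt
  set cs := source.toList
  set ps := pattern.toList
  have hm : 0 < ps.length := List.length_pos_iff.mpr hp
  have htbl : ∀ k, k < ps.length →
      IsMaxB ps (k+1) ((kmpTableGo ps [0] 1).getD k 0) := by
    refine kmpTableGo_spec ps (ps.length - 1) 1 [0] rfl le_rfl hm rfl ?_
    intro k hk
    have : k = 0 := by omega
    subst this
    exact ⟨border_zero ps 1 one_pos, fun l hl => Nat.le_of_lt_succ hl.1⟩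
  have := kmpLoopGo_eq_scan cs ps (kmpTableGo ps [0] 1) hm htbl cs 0 0 []
    List.drop_zero (Nat.zero_le _) hm le_rfl (pm_zero cs ps 0)
  simpa using this
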